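-- pv_equiv track=rewrite | github.com/masyago/ls_py110 | spot/alpha_sym_4.py | solve
-- ===== SOURCE A (Python) =====
-- ALPHABET = 'abcdefghijklmnopqrstuvwxyz'
--
-- def solve(lst):
--     alpha_positions = []
--     for words in lst:
--         words = words.lower()
--         count = 0
--         for letter in words:
--             if words.index(letter) == ALPHABET.index(letter):
--                 count += 1
--         alpha_positions.append(count)
--
--     return alpha_positions
-- ===== SOURCE B (Python) =====
-- ALPHABET = 'abcdefghijklmnopqrstuvwxyz'
--
-- def solve(lst):
--     result = []
--     for word in lst:
--         w = word.lower()
--         freq = {}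
--         for ch in w:
--             freq[ch] = freq.get(ch, 0) + 1
--         total = 0
--         for ch, n in freq.items():
--             if w.index(ch) == ALPHABET.index(ch):
--                 total += n
--         result.append(total)
--     return result
-- ===== Notes on version B (the rewrite author's own statement) =====
-- stated objective: alternative
-- what changed: B builds a per-word character frequency dict in one pass and then runs the index test once per DISTINCT letter, adding that letter's frequency, instead of A's re-testing every occurrence.
import Mathlib
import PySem

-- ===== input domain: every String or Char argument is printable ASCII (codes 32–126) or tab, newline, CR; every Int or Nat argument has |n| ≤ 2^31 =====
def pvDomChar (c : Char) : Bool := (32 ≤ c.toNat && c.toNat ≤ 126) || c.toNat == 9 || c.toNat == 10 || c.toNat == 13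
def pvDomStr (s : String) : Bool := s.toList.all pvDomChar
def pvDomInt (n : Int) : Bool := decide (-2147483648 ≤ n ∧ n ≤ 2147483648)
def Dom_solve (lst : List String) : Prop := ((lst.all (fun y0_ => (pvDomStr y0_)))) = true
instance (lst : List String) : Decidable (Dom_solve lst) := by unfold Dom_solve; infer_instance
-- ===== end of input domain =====

-- B replaces A's per-occurrence rescan with a frequency-dict pass over distinct letters (alternative decomposition, same values).

-- ===== PORT A =====
def pvAlpha : List Char := "abcdefghijklmnopqrstuvwxyz".toList

def solve (lst : List String) : List Int :=
  lst.foldl (fun alpha_positions words =>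
    let wl := PySem.Chars.lower words.toList
    let count := wl.foldl (fun count letter =>
      if PySem.Chars.find wl [letter] = PySem.Chars.find pvAlpha [letter] then count + 1 else count) 0
    alpha_positions ++ [count]) []

-- ===== PORT B =====
def solve_alt (lst : List String) : List Int :=
  lst.foldl (fun result word =>
    let w := PySem.Chars.lower word.toList
    let freq := w.foldl (fun d ch => d.insert ch (d.getD ch 0 + 1)) (PySem.Dict.empty : PySem.Dict Char Int)
    let total := freq.items.foldl (fun total kv =>
      if PySem.Chars.find w [kv.1] = PySem.Chars.find pvAlpha [kv.1] then total + kv.2 else total) 0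
    result ++ [total]) []

-- ===== PRECONDITION & SPEC =====
-- Pre_ excludes exactly the inputs where Python's ALPHABET.index raises ValueError: any word
-- containing a non-alphabetic character (both A and B raise there).
def Pre_solve (lst : List String) : Prop := ∀ s ∈ lst, s.toList.all PySem.Chars.isalpha = true
instance (lst : List String) : Decidable (Pre_solve lst) := by unfold Pre_solve; infer_instance
def pvWitness_solve : List String := (["abc", "Bad"])
def Spec_solve (lst : List String) (out : List Int) : Prop := out = solve_alt lst
instance (lst : List String) (out : List Int) : Decidable (Spec_solve lst out) := by unfold Spec_solve; infer_instance

-- ===== CLAIM (what is proved, stated in full; the proofs are below) =====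
def Claim_equal_solve : Prop := ∀ (lst : List String), Dom_solve lst → Pre_solve lst → Spec_solve lst (solve lst)

-- ===== LEMMAS AND PROOFS =====

-- sum over a nodup list containing a of (if k = a then v else 0) is v
theorem pv_sum_map_ite_eq (d : List Char) (a : Char) (v : Int) (hnd : d.Nodup) (ha : a ∈ d) :
    (d.map (fun k => if k = a then v else 0)).sum = v := by
  induction d with
  | nil => cases ha
  | cons b d ih =>
    rcases List.mem_cons.mp ha with h | h
    · subst h
      simp only [List.map_cons, List.sum_cons]
      have : ∀ k ∈ d, (if k = a then v else 0) = 0 := by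
        intro k hk
        have : k ≠ a := fun he => (List.nodup_cons.mp hnd).1 (he ▸ hk)
        simp [this]
      rw [List.map_congr_left this]
      simp
    · have hba : b ≠ a := fun he => (List.nodup_cons.mp hnd).1 (he ▸ h)
      simp only [List.map_cons, List.sum_cons, if_neg hba, zero_add]
      exact ih (List.nodup_cons.mp hnd).2 h

-- the central counting identity: summing (if p k then count k else 0) over a nodup list d
-- containing every element of w equals countP p w
theorem pv_sum_count_eq_countP (w d : List Char) (p : Char → Bool)
    (hnd : d.Nodup) (hmem : ∀ a ∈ w, a ∈ d) :
    (d.map (fun k => if p k then (w.count k : Int) else 0)).sum = (w.countP p : Int) := by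
  induction w with
  | nil => simp
  | cons a w ih =>
    have hstep : ∀ k ∈ d, (if p k then (((a :: w).count k : Nat) : Int) else 0)
        = (if p k then (w.count k : Int) else 0) + (if k = a then (if p a then (1:Int) else 0) else 0) := by
      intro k _
      by_cases hka : k = a
      · subst hka
        simp [List.count_cons_self]
        by_cases hp : p k <;> simp [hp]
      · have : (a :: w).count k = w.count k := by
          rw [List.count_cons]; simp [Ne.symm hka]
        rw [this]; simp [hka]
    rw [List.map_congr_left hstep]
    rw [List.sum_map_add]
    rw [ih (fun a ha => hmem a (List.mem_cons_of_mem _ ha))]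
    rw [pv_sum_map_ite_eq d a _ hnd (hmem a List.mem_cons_self)]
    rw [List.countP_cons]
    by_cases hp : p a <;> simp [hp]

-- A's inner loop is a countP
theorem pv_A_inner (w : List Char) (p : Char → Prop) [DecidablePred p] :
    w.foldl (fun count letter => if p letter then count + 1 else count) (0 : Int)
      = (w.countP (fun c => decide (p c)) : Int) := by
  induction w using List.reverseRecOn with
  | nil => simp
  | append_singleton w a ih =>
    rw [List.foldl_append, List.countP_append, ih]
    by_cases hp : p a <;> simp [hp]

-- B's inner loop over the items of the frequency dict
theorem pv_B_inner (w : List Char) (p : Char → Prop) [DecidablePred p] :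
    ((w.foldl (fun d ch => d.insert ch (d.getD ch 0 + 1)) (PySem.Dict.empty : PySem.Dict Char Int)).items.foldl
      (fun total kv => if p kv.1 then total + kv.2 else total) 0) = (w.countP (fun c => decide (p c)) : Int) := by
  rw [PySem.Dict.foldl_insert_getD_add_one_eq_counter, PySem.Dict.items_counter]
  have h1 : ∀ (l : List (Char × Int)) (acc : Int),
      l.foldl (fun total kv => if p kv.1 then total + kv.2 else total) acc
        = acc + (l.map (fun kv => if p kv.1 then kv.2 else 0)).sum := by
    intro l
    induction l with
    | nil => simp
    | cons kv l ih =>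
      intro acc
      simp only [List.foldl_cons, List.map_cons, List.sum_cons, ih]
      by_cases hp : p kv.1 <;> simp [hp, add_assoc]
  rw [h1, List.map_map]
  have h2 : ((fun kv : Char × Int => if p kv.1 then kv.2 else 0) ∘ fun k => (k, (w.count k : Int)))
      = fun k => if (fun c => decide (p c)) k = true then (w.count k : Int) else 0 := by
    funext k
    by_cases hp : p k <;> simp [hp]
  rw [h2, pv_sum_count_eq_countP w _ (fun c => decide (p c)) (PySem.Set.nodup_ofList w)
    (fun a ha => (PySem.Set.mem_ofList w a).mpr ha)]
  ring

-- ===== VERDICT (by name: the statement is the Claim_ definition above) =====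
theorem solve_spec : Claim_equal_solve := by
  intro lst hd hp
  unfold Spec_solve solve solve_alt
  induction lst using List.reverseRecOn with
  | nil => rfl
  | append_singleton lst s ih =>
    simp only [List.foldl_append, List.foldl_cons, List.foldl_nil]
    rw [ih (by unfold Dom_solve at hd ⊢; simp only [List.all_append, Bool.and_eq_true] at hd; exact hd.1)
          (fun t ht => hp t (List.mem_append_left _ ht))]
    congr 1
    rw [pv_A_inner]
    exact congrArg (fun z => [z]) (pv_B_inner (PySem.Chars.lower s.toList)
      (fun c => PySem.Chars.find (PySem.Chars.lower s.toList) [c] = PySem.Chars.find pvAlpha [c])).symm
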